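-- pv_equiv track=rewrite | github.com/WalsonK/DRLPy | environement/tools.py | check_multiples
-- ===== SOURCE A (Python) =====
-- from collections import Counter
--
-- def check_multiples(dice: list) -> tuple:
--     """
--     Check for multiples (3, 4, 5x, or 6 of the same number) in the dice.
--
--     This function calculates the score for any multiples found and returns the score
--     along with a list of dice that have been used for these combinations, and a binary list
--     indicating which dice were used (1 for used, 0 for not used).
--
--     Args:
--         dice (list): A list of integers representing the dice rolled.
--
--     Returns:
--         tuple: A tuple containing:
--             - score (int): The score based on the multiples found.
--             - used_dice (list): A list of integers representing the dice used in the multiples.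
--             - binary_used_dice (list): A list of integers (1 or 0) indicating which dice were used.
--     """
--     counts = Counter(dice)
--     score = 0
--     used_dice = []
--
--     binary_used_dice = [0] * len(dice)
--
--     for num, count in counts.items():
--         if count >= 3:
--             base_score = 1000 if num == 1 else num * 100  # 1000 for three 1s, otherwise num * 100
--
--             score += base_score
--
--             if count == 4:
--                 score += base_score  # x2 for 4 dice
--             elif count == 5:
--                 score += base_score * 3  # x4 for 5 dice
--             elif count == 6:
--                 score += base_score * 7  # x8 for 6 dice
--
--             used_dice.extend([num] * count)
--
--             used_count = 0
--             for i, d in enumerate(dice):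
--                 if d == num and used_count < count:
--                     binary_used_dice[i] = 1
--                     used_count += 1
--
--     return score, used_dice, binary_used_dice
-- ===== SOURCE B (Python) =====
-- def check_multiples(dice: list) -> tuple:
--     # One grouping pass: value -> list of positions (first-appearance order,
--     # like Counter); no per-value rescan of dice.
--     positions = {}
--     for i, d in enumerate(dice):
--         positions.setdefault(d, []).append(i)
--
--     score = 0
--     used_dice = []
--     binary_used_dice = [0] * len(dice)
--
--     for num, idxs in positions.items():
--         count = len(idxs)
--         if count >= 3:
--             base = 1000 if num == 1 else num * 100
--             mult = 2 if count == 4 else 4 if count == 5 else 8 if count == 6 else 1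
--             score += base * mult
--             used_dice.extend([num] * count)
--             for i in idxs:
--                 binary_used_dice[i] = 1
--
--     return score, used_dice, binary_used_dice
-- ===== Notes on version B (the rewrite author's own statement) =====
-- stated objective: alternative
-- what changed: B builds one dict mapping each die value to the list of its positions in a single grouping pass and marks used dice directly from the stored positions, replacing A's Counter plus a per-value nested rescan of the dice list.
import Mathlib
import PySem

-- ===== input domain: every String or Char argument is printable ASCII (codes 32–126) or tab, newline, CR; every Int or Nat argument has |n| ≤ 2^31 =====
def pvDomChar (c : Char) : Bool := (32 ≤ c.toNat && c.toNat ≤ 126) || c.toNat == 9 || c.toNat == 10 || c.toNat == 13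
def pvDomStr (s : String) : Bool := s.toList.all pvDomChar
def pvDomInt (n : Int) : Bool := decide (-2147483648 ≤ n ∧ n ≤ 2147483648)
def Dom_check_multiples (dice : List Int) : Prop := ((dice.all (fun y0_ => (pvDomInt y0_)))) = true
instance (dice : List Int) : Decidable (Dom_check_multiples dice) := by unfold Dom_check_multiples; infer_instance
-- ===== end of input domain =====

-- B groups dice positions by value in one pass (dict value -> positions) instead of
-- A's Counter plus a per-value rescan of the dice; equivalent return value, alternative decomposition.

-- ===== PORT A =====
-- body of A's `for num, count in counts.items()` loop (with the inner rescan over enumerate(dice))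
def aStep (dice : List Int) (st : Int × List Int × List Int) (p : Int × Int) :
    Int × List Int × List Int :=
  if 3 ≤ p.2 then
    let base : Int := if p.1 == 1 then 1000 else p.1 * 100
    let s1 := st.1 + base
    let s2 := if p.2 == 4 then s1 + base
              else if p.2 == 5 then s1 + base * 3
              else if p.2 == 6 then s1 + base * 7
              else s1
    let inner := (PySem.List.enumerate dice 0).foldl
      (fun (bu : List Int × Int) q =>
        if q.2 == p.1 && decide (bu.2 < p.2) then (bu.1.set q.1.toNat 1, bu.2 + 1) else bu)
      (st.2.2, (0 : Int))
    (s2, st.2.1 ++ List.replicate p.2.toNat p.1, inner.1)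
  else st

def check_multiples (dice : List Int) : Int × List Int × List Int :=
  (PySem.Dict.counter dice).items.foldl (aStep dice)
    (0, [], List.replicate dice.length 0)

-- ===== PORT B =====
-- body of B's `for num, idxs in positions.items()` loop
def bStep (st : Int × List Int × List Int) (p : Int × List Int) :
    Int × List Int × List Int :=
  if 3 ≤ (p.2.length : Int) then
    let base : Int := if p.1 == 1 then 1000 else p.1 * 100
    let mult : Int := if (p.2.length : Int) == 4 then 2
                      else if (p.2.length : Int) == 5 then 4
                      else if (p.2.length : Int) == 6 then 8
                      else 1
    (st.1 + base * mult, st.2.1 ++ List.replicate p.2.length p.1,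
      p.2.foldl (fun b i => b.set i.toNat 1) st.2.2)
  else st

def check_multiples_alt (dice : List Int) : Int × List Int × List Int :=
  ((PySem.List.enumerate dice 0).foldl
    (fun (d : PySem.Dict Int (List Int)) p => d.modify p.2 [] (· ++ [p.1]))
    PySem.Dict.empty).items.foldl bStep (0, [], List.replicate dice.length 0)

-- ===== PRECONDITION & SPEC =====
def Spec_check_multiples (dice : List Int) (out : Int × List Int × List Int) : Prop := out = check_multiples_alt dice
instance (dice : List Int) (out : Int × List Int × List Int) : Decidable (Spec_check_multiples dice out) := by unfold Spec_check_multiples; infer_instance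

-- ===== CLAIM (what is proved, stated in full; the proofs are below) =====
def Claim_equal_check_multiples : Prop := ∀ (dice : List Int), Dom_check_multiples dice → Spec_check_multiples dice (check_multiples dice)

-- ===== LEMMAS AND PROOFS =====


-- list of positions of value k in dice, in order (proof-side characterisation)
def idxsOf (dice : List Int) (k : Int) : List Int :=
  ((PySem.List.enumerate dice 0).filter (fun q => q.2 == k)).map (·.1)

theorem countP_enumerate (dice : List Int) (k : Int) :
    (PySem.List.enumerate dice 0).countP (fun q => q.2 == k) = dice.count k := by
  have h := @List.countP_map (Int × Int) Int (fun x => x == k) (fun q => q.2)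
    (PySem.List.enumerate dice 0)
  simp only [PySem.List.map_snd_enumerate] at h
  rw [List.count]
  exact h.symm

theorem length_idxsOf (dice : List Int) (k : Int) :
    (idxsOf dice k).length = dice.count k := by
  rw [idxsOf, List.length_map, ← List.countP_eq_length_filter, countP_enumerate]

theorem positions_items (dice : List Int) :
    ((PySem.List.enumerate dice 0).foldl
      (fun (d : PySem.Dict Int (List Int)) p => d.modify p.2 [] (· ++ [p.1]))
      PySem.Dict.empty).items
    = (PySem.Set.ofList dice).map (fun k => (k, idxsOf dice k)) := by
  have hkeys : ((PySem.List.enumerate dice 0).foldl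
      (fun (d : PySem.Dict Int (List Int)) p => d.modify p.2 [] (· ++ [p.1]))
      PySem.Dict.empty).keys = PySem.Set.ofList dice := by
    have h1 := PySem.Dict.keys_foldl_modify_key (PySem.List.enumerate dice 0)
      (fun p => p.2) ([] : List Int) (fun _ p => (· ++ [p.1])) PySem.Dict.empty
    rw [PySem.List.map_snd_enumerate] at h1
    rw [h1, PySem.Set.ofList_eq_foldl]
    simp [PySem.Set.update]
  have hnd : ((PySem.List.enumerate dice 0).foldl
      (fun (d : PySem.Dict Int (List Int)) p => d.modify p.2 [] (· ++ [p.1]))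
      PySem.Dict.empty).keys.Nodup := by
    rw [hkeys]; exact PySem.Set.nodup_ofList dice
  have hgetD : ∀ k : Int, ((PySem.List.enumerate dice 0).foldl
      (fun (d : PySem.Dict Int (List Int)) p =>
        d.modify p.2 [] (· ++ [p.1])) PySem.Dict.empty).getD k [] = idxsOf dice k := by
    intro k
    have hrw : ((PySem.List.enumerate dice 0).foldl
        (fun (d : PySem.Dict Int (List Int)) p => d.modify p.2 [] (· ++ [p.1]))
        PySem.Dict.empty)
        = (((PySem.List.enumerate dice 0).map (fun p => (p.2, p.1))).foldl
            (fun (d : PySem.Dict Int (List Int)) p => d.modify p.1 [] (· ++ [p.2]))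
            PySem.Dict.empty) := by
      rw [List.foldl_map]
    rw [hrw, PySem.Dict.getD_foldl_modify_append]
    simp [idxsOf, List.filter_map, List.map_map, Function.comp_def]
  rw [PySem.Dict.items_eq_map_keys _ hnd ([] : List Int), hkeys]
  exact List.map_congr_left (fun k _ => by rw [hgetD k])

theorem inner_eq (num cnt : Int) : ∀ (l : List (Int × Int)) (b : List Int) (uc : Int),
    uc + (l.countP (fun q => q.2 == num) : Int) ≤ cnt →
    (l.foldl (fun (bu : List Int × Int) q =>
        if q.2 == num && decide (bu.2 < cnt) then (bu.1.set q.1.toNat 1, bu.2 + 1) else bu)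
      (b, uc)).1
    = ((l.filter (fun q => q.2 == num)).map (·.1)).foldl (fun b i => b.set i.toNat 1) b := by
  intro l
  induction l with
  | nil => intro b uc _; simp
  | cons q l ih =>
    intro b uc h
    rw [List.countP_cons] at h
    by_cases hq : (q.2 == num) = true
    · have huc : uc < cnt := by
        rw [if_pos hq] at h
        push_cast at h
        omega
      have hstep : (if (q.2 == num && decide ((b, uc).2 < cnt)) = true
          then ((b, uc).1.set q.1.toNat 1, (b, uc).2 + 1) else (b, uc))
          = (b.set q.1.toNat 1, uc + 1) := by
        simp [hq, huc]
      have hfil : List.filter (fun q => q.2 == num) (q :: l)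
          = q :: List.filter (fun q => q.2 == num) l := by
        simp [hq]
      rw [List.foldl_cons, hstep, hfil, List.map_cons, List.foldl_cons]
      apply ih
      rw [if_pos hq] at h
      push_cast at h ⊢
      omega
    · have hstep : (if (q.2 == num && decide ((b, uc).2 < cnt)) = true
          then ((b, uc).1.set q.1.toNat 1, (b, uc).2 + 1) else (b, uc)) = (b, uc) := by
        simp [hq]
      have hfil : List.filter (fun q => q.2 == num) (q :: l)
          = List.filter (fun q => q.2 == num) l := by
        simp [hq]
      rw [List.foldl_cons, hstep, hfil]
      apply ih
      rw [if_neg hq] at h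
      omega

theorem step_eq (dice : List Int) (acc : Int × List Int × List Int) (k : Int) :
    aStep dice acc (k, (dice.count k : Int)) = bStep acc (k, idxsOf dice k) := by
  have hlen : (idxsOf dice k).length = dice.count k := length_idxsOf dice k
  have hinner := inner_eq k (dice.count k : Int) (PySem.List.enumerate dice 0) acc.2.2 0
    (by rw [countP_enumerate]; omega)
  unfold aStep bStep
  rw [hlen]
  by_cases h3 : (3 : Int) ≤ (dice.count k : Int)
  · rw [if_pos h3, if_pos h3]
    refine Prod.ext ?_ (Prod.ext ?_ ?_)
    · simp only
      split_ifs <;> ring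
    · simp only
      rw [Int.toNat_natCast]
    · simp only
      rw [hinner]
      rfl
  · rw [if_neg h3, if_neg h3]

theorem main_eq (dice : List Int) : check_multiples dice = check_multiples_alt dice := by
  unfold check_multiples check_multiples_alt
  rw [PySem.Dict.items_counter, positions_items, List.foldl_map, List.foldl_map]
  exact PySem.List.foldl_congr_mem _ _ _ _ (fun acc k _ => step_eq dice acc k)

-- ===== VERDICT (by name: the statement is the Claim_ definition above) =====
theorem check_multiples_spec : Claim_equal_check_multiples := by
  intro dice _
  unfold Spec_check_multiples
  exact main_eq dice
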